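-- pv_equiv track=rewrite | github.com/e-koch/M31-SMA-OTF | apply_compass_solutions.py | make_meta_dict
-- ===== SOURCE A (Python) =====
-- def make_meta_dict(meta_lines):
--     '''
--     Convert the meta lines into something nice.
--     '''
--
--     data_dict = {}
--
--     for line in meta_lines:
--
--         # Skip "# "
--         line = line[2:]
--
--         # Some plotms output will have multiple name:value pairs
--         num_names = len(line.split(": ")) // 2
--
--         for ii in range(num_names):
--
--             name, value = line.split(": ")[2*ii:2*(ii)+2]
--
--             name = name.strip(" ")
--             value = value.strip(" ")
--             value = value.strip("\n")
--
--             data_dict[name] = value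
--
--     # CASA 6.6 uses 'file' instead of 'vis'.
--     if 'file' in data_dict:
--         data_dict['vis'] = data_dict['file']
--         del data_dict['file']
--
--     return data_dict
-- ===== SOURCE B (Python) =====
-- def make_meta_dict(meta_lines):
--     '''
--     Convert the meta lines into something nice.
--     '''
--
--     data_dict = {}
--
--     for line in meta_lines:
--         # Streaming parse: never build a token list; consume the line with
--         # repeated partition(': '), alternating name / value.
--         rest = line[2:]
--         while True:
--             name, sep, rest = rest.partition(': ')
--             if not sep:
--                 # no separator left: an unpaired trailing token is dropped
--                 break
--             value, sep, rest = rest.partition(': ')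
--             data_dict[name.strip(' ')] = value.strip(' ').strip('\n')
--             if not sep:
--                 break
--
--     # CASA 6.6 uses 'file' instead of 'vis'.
--     if 'file' in data_dict:
--         data_dict['vis'] = data_dict['file']
--         del data_dict['file']
--
--     return data_dict
-- ===== Notes on version B (the rewrite author's own statement) =====
-- stated objective: alternative
-- what changed: B never calls split or builds a token list: each line is consumed by a streaming parser that repeatedly applies str.partition(': ') in a while loop, alternating name/value with early breaks, instead of A's re-splitting the whole line on every iteration of an index loop over range(len(split)//2) and slicing out each pair.
import Mathlib
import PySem

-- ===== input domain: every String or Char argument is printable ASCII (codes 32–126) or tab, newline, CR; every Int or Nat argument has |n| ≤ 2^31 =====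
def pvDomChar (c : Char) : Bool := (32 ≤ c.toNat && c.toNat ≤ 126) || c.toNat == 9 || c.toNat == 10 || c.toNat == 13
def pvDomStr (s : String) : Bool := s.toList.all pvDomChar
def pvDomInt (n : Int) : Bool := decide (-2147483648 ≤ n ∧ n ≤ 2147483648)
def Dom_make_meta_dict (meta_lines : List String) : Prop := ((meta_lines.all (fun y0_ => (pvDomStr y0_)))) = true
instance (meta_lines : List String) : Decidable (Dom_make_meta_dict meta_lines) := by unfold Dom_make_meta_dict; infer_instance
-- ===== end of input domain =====

-- B replaces A's split-then-index-pairs loop (which re-splits the line on every pair index)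
-- by a streaming parser that never builds a token list: each line is consumed by repeated
-- partition(': '), alternating name/value; objective: alternative (a different parsing strategy).

-- ===== PORT A =====
-- inner loop body of A: name, value = line.split(": ")[2*ii:2*(ii)+2]; strips; data_dict[name] = value
-- (ts is line.split(": "), which Python recomputes each iteration to the same value)
def pvStoreA (ts : List String) (d : PySem.Dict String String) (ii : Int) : PySem.Dict String String :=
  match PySem.List.slice ts (some (2*ii)) (some (2*ii+2)) with
  | [name, value] =>
      d.insert (PySem.Str.stripChars name " ")
        (PySem.Str.stripChars (PySem.Str.stripChars value " ") "\n")
  | _ => d  -- unpacking a slice that is not a pair (never happens for ii in range(len//2))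

-- per-line body of A's outer loop
def pvLineA (d : PySem.Dict String String) (line0 : String) : PySem.Dict String String :=
  let line := PySem.Str.slice line0 (some 2) none            -- line = line[2:]
  let ts := (PySem.Str.split? line ": ").getD []             -- line.split(": ")  (sep ≠ "", never none)
  let num_names := PySem.Int.floordiv (ts.length : Int) 2
  (PySem.List.pyRange 0 num_names 1).foldl (pvStoreA ts) d

def make_meta_dict (meta_lines : List String) : List (String × String) :=
  let d := meta_lines.foldl pvLineA PySem.Dict.empty
  -- if 'file' in data_dict: data_dict['vis'] = data_dict['file']; del data_dict['file']
  match d.get? "file" with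
  | some v => ((d.insert "vis" v).erase "file").items
  | none => d.items

-- ===== PORT B =====
-- hand port of Python's str.partition(': ') (PySem has no partition); exact: the split is
-- at the FIRST occurrence of the separator (PySem.Chars.find), '' pieces when absent
def pvPartition (s : List Char) : List Char × List Char × List Char :=
  let j := PySem.Chars.find s [':', ' ']
  if j < 0 then (s, [], [])
  else (s.take j.toNat, [':', ' '], s.drop (j.toNat + 2))

-- data_dict[name.strip(' ')] = value.strip(' ').strip('\n')
def pvStoreB (d : PySem.Dict String String) (name value : List Char) : PySem.Dict String String :=
  d.insert (PySem.Str.stripChars (String.ofList name) " ")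
    (PySem.Str.stripChars (PySem.Str.stripChars (String.ofList value) " ") "\n")

-- termination of B's while loop: a successful partition strictly shrinks the rest
theorem pvPartition_rest_lt (s : List Char) (h : (pvPartition s).2.1 ≠ []) :
    (pvPartition s).2.2.length < s.length := by
  by_cases hj : PySem.Chars.find s [':', ' '] < 0
  · simp [pvPartition, hj] at h
  · have h0 : 0 ≤ PySem.Chars.find s [':', ' '] := by omega
    have hinf := (PySem.Chars.find_nonneg_iff s [':', ' ']).mp h0
    have hle := hinf.length_le
    simp only [pvPartition, if_neg hj, List.length_drop]
    simp at hle
    omega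

-- the body of B's 'while True' loop over one line's remaining text
def pvParse (d : PySem.Dict String String) (s : List Char) : PySem.Dict String String :=
  let p1 := pvPartition s                                    -- name, sep, rest = rest.partition(': ')
  if h1 : p1.2.1 = [] then d                                 -- if not sep: break
  else
    let p2 := pvPartition p1.2.2                             -- value, sep, rest = rest.partition(': ')
    let d' := pvStoreB d p1.1 p2.1
    if h2 : p2.2.1 = [] then d' else pvParse d' p2.2.2       -- if not sep: break
termination_by s.length
decreasing_by exact lt_trans (pvPartition_rest_lt _ h2) (pvPartition_rest_lt _ h1)

def make_meta_dict_alt (meta_lines : List String) : List (String × String) :=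
  let d := meta_lines.foldl
    (fun d line => pvParse d (PySem.Chars.slice line.toList (some 2) none)) PySem.Dict.empty
  -- if 'file' in data_dict: data_dict['vis'] = data_dict['file']; del data_dict['file']
  match d.get? "file" with
  | some v => ((d.insert "vis" v).erase "file").items
  | none => d.items

-- ===== PRECONDITION & SPEC =====
def Spec_make_meta_dict (meta_lines : List String) (out : List (String × String)) : Prop := out = make_meta_dict_alt meta_lines
instance (meta_lines : List String) (out : List (String × String)) : Decidable (Spec_make_meta_dict meta_lines out) := by unfold Spec_make_meta_dict; infer_instance

-- ===== CLAIM (what is proved, stated in full; the proofs are below) =====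
def Claim_equal_make_meta_dict : Prop := ∀ (meta_lines : List String), Dom_make_meta_dict meta_lines → Spec_make_meta_dict meta_lines (make_meta_dict meta_lines)

-- ===== LEMMAS AND PROOFS =====

-- A's store body on a ready (name, value) String pair
def pvStoreS (d : PySem.Dict String String) (p : String × String) : PySem.Dict String String :=
  d.insert (PySem.Str.stripChars p.1 " ")
    (PySem.Str.stripChars (PySem.Str.stripChars p.2 " ") "\n")

-- consecutive pairs of a token list, leftover dropped (String / char-list versions)
def pvPairs : List String → List (String × String)
  | name :: value :: rest => (name, value) :: pvPairs rest
  | _ => []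

def pvPairsC : List (List Char) → List (List Char × List Char)
  | name :: value :: rest => (name, value) :: pvPairsC rest
  | _ => []

-- naive structural recursion computing split(": ") at the char level
def pvConsHead (c : Char) : List (List Char) → List (List Char)
  | [] => [[c]]
  | h :: t => (c :: h) :: t

def pvSplitS : List Char → List (List Char)
  | [] => [[]]
  | c :: rest =>
      if [':', ' '].isPrefixOf (c :: rest) then [] :: pvSplitS rest.tail
      else pvConsHead c (pvSplitS rest)
termination_by s => s.length
decreasing_by
  · simp [List.length_tail]
  · simp

theorem pvSplitS_nil : pvSplitS [] = [[]] := by rw [pvSplitS.eq_def]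

theorem pvSplitS_cons (c : Char) (rest : List Char) :
    pvSplitS (c :: rest)
      = if [':', ' '].isPrefixOf (c :: rest) then [] :: pvSplitS rest.tail
        else pvConsHead c (pvSplitS rest) := by
  rw [pvSplitS.eq_def]

def pvMapHead (f : List Char → List Char) : List (List Char) → List (List Char)
  | [] => []
  | h :: t => f h :: t

theorem pvSplitS_ne_nil (s : List Char) : pvSplitS s ≠ [] := by
  induction s using pvSplitS.induct with
  | case1 => simp [pvSplitS_nil]
  | case2 c rest h ih => simp [pvSplitS_cons, h]
  | case3 c rest h ih =>
      rw [pvSplitS_cons, if_neg h]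
      cases hx : pvSplitS rest <;> simp [pvConsHead]

theorem pvMapHead_append (a : List Char) (c : Char) (xs : List (List Char)) (hx : xs ≠ []) :
    pvMapHead (fun x => (a ++ [c]) ++ x) xs = pvMapHead (fun x => a ++ x) (pvConsHead c xs) := by
  cases xs with
  | nil => simp at hx
  | cons h t => simp [pvMapHead, pvConsHead]

-- the fuel-based splitOn.go computes pvSplitS
theorem pvGo_eq : ∀ (n : Nat) (l : List Char), l.length ≤ n → ∀ (fuel : Nat), l.length ≤ fuel →
    ∀ (cur : List Char) (acc : List (List Char)),
    PySem.Chars.splitOn.go [':', ' '] fuel l cur acc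
      = acc.reverse ++ pvMapHead (fun x => cur.reverse ++ x) (pvSplitS l) := by
  intro n
  induction n with
  | zero =>
      intro l hl fuel hf cur acc
      have : l = [] := by cases l <;> simp_all
      subst this
      cases fuel <;> simp [PySem.Chars.splitOn.go, pvSplitS_nil, pvMapHead]
  | succ m ih =>
      intro l hl fuel hf cur acc
      cases l with
      | nil => cases fuel <;> simp [PySem.Chars.splitOn.go, pvSplitS_nil, pvMapHead]
      | cons c rest =>
          cases fuel with
          | zero => simp at hf
          | succ f =>
              rw [PySem.Chars.splitOn.go]
              by_cases hp : [':', ' '].isPrefixOf (c :: rest) = true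
              · rw [if_pos hp]
                have hpre : [':', ' '] <+: (c :: rest) := List.isPrefixOf_iff_prefix.mp hp
                have hdrop : List.drop [':', ' '].length (c :: rest) = rest.tail := by
                  simp [List.drop_succ_cons, List.drop_one]
                rw [hdrop, ih rest.tail (by simp [List.length_tail] at *; omega) f
                      (by simp [List.length_tail] at *; omega) [] (cur.reverse :: acc)]
                rw [pvSplitS_cons, if_pos hp]
                have hne := pvSplitS_ne_nil rest.tail
                cases hx : pvSplitS rest.tail with
                | nil => exact absurd hx hne
                | cons h t => simp [pvMapHead]
              · rw [if_neg hp]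
                rw [ih rest (by simp at hl; omega) f (by simp at hf; omega) (c :: cur) acc]
                rw [pvSplitS_cons, if_neg hp]
                have : (c :: cur).reverse = cur.reverse ++ [c] := by simp
                rw [this, pvMapHead_append _ _ _ (pvSplitS_ne_nil rest)]

theorem pvSplitOn_eq (s : List Char) : PySem.Chars.splitOn s [':', ' '] = pvSplitS s := by
  rw [PySem.Chars.splitOn,
      pvGo_eq s.length s le_rfl (s.length + 1) (by omega) [] []]
  have hne := pvSplitS_ne_nil s
  cases hx : pvSplitS s with
  | nil => exact absurd hx hne
  | cons h t => simp [pvMapHead]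

-- pvSplitS when the separator does not occur
theorem pvSplitS_no (s : List Char) (h : ¬ [':', ' '] <:+: s) : pvSplitS s = [s] := by
  induction s with
  | nil => simp [pvSplitS_nil]
  | cons c rest ih =>
      have hp : ¬ [':', ' '].isPrefixOf (c :: rest) = true := by
        intro hp
        exact h (List.isPrefixOf_iff_prefix.mp hp).isInfix
      rw [pvSplitS_cons, if_neg hp, ih (fun hi => h (hi.trans (List.suffix_cons c rest).isInfix))]
      simp [pvConsHead]

-- pvSplitS peels the FIRST occurrence
theorem pvSplitS_found : ∀ (j : Nat) (s : List Char),
    [':', ' '] <+: s.drop j → (∀ i, i < j → ¬ [':', ' '] <+: s.drop i) → j ≤ s.length →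
    pvSplitS s = s.take j :: pvSplitS (s.drop (j + 2)) := by
  intro j
  induction j with
  | zero =>
      intro s hpre _ _
      simp at hpre
      obtain ⟨t, ht⟩ := hpre
      subst ht
      simp only [List.cons_append, List.nil_append]
      rw [pvSplitS_cons,
          if_pos (show [':', ' '].isPrefixOf (':' :: ' ' :: t) = true from
            List.isPrefixOf_iff_prefix.mpr ⟨t, rfl⟩)]
      simp [List.tail]
  | succ j ih =>
      intro s hpre hmin hlen
      cases s with
      | nil => simp at hlen
      | cons c rest =>
          have h0 : ¬ [':', ' '] <+: (c :: rest) := by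
            have := hmin 0 (by omega); simpa using this
          rw [pvSplitS_cons, if_neg (by simpa using fun hp => h0 (List.isPrefixOf_iff_prefix.mp hp))]
          rw [ih rest (by simpa [List.drop_succ_cons] using hpre)
              (fun i hi => by simpa [List.drop_succ_cons] using hmin (i + 1) (by omega))
              (by simp at hlen; omega)]
          simp [pvConsHead, List.take_succ_cons, List.drop_succ_cons]

-- combined: one partition step of pvSplitS, driven by find
theorem pvSplitS_step (s : List Char) (h : ¬ PySem.Chars.find s [':', ' '] < 0) :
    pvSplitS s
      = s.take (PySem.Chars.find s [':', ' ']).toNat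
          :: pvSplitS (s.drop ((PySem.Chars.find s [':', ' ']).toNat + 2)) := by
  have hne : PySem.Chars.findFrom s [':', ' '] ((0 : Nat) : Int) ≠ -1 := by
    rw [show (((0 : Nat) : Int)) = (0 : Int) by norm_num, PySem.Chars.findFrom_zero]
    omega
  have hspec := PySem.Chars.findFrom_natCast_spec s [':', ' '] 0 (by omega) hne
  rw [show (((0 : Nat) : Int)) = (0 : Int) by norm_num, PySem.Chars.findFrom_zero] at hspec
  have hlen : (PySem.Chars.find s [':', ' ']).toNat ≤ s.length := by
    have := PySem.Chars.find_le_length s [':', ' ']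
    omega
  exact pvSplitS_found _ s hspec.2.1 (fun i hi => hspec.2.2 i (by omega) hi) hlen

-- B's streaming parser equals A's pairwise fold over the split tokens
theorem pvParse_eq : ∀ (n : Nat) (s : List Char), s.length ≤ n → ∀ d,
    pvParse d s = (pvPairsC (pvSplitS s)).foldl (fun d p => pvStoreB d p.1 p.2) d := by
  intro n
  induction n with
  | zero =>
      intro s hs d
      have : s = [] := by cases s <;> simp_all
      subst this
      rw [pvParse]
      simp [pvPartition, PySem.Chars.find, PySem.Chars.find.go, pvSplitS_nil, pvPairsC]
  | succ m ih =>
      intro s hs d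
      rw [pvParse]
      by_cases h1 : PySem.Chars.find s [':', ' '] < 0
      · have hnf : ¬ [':', ' '] <:+: s := by
          rw [← PySem.Chars.find_eq_neg_one_iff]
          have := PySem.Chars.neg_one_le_find s [':', ' ']
          omega
        simp [pvPartition, if_pos h1, pvSplitS_no s hnf, pvPairsC]
      · have hstep := pvSplitS_step s h1
        set j := (PySem.Chars.find s [':', ' ']).toNat with hj
        have hrest : (pvPartition s).2.2 = s.drop (j + 2) := by
          simp only [pvPartition]; rw [if_neg h1]
        have hname : (pvPartition s).1 = s.take j := by
          simp only [pvPartition]; rw [if_neg h1]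
        have hsep : (pvPartition s).2.1 = [':', ' '] := by
          simp only [pvPartition]; rw [if_neg h1]
        rw [dif_neg (by rw [hsep]; simp)]
        by_cases h2 : PySem.Chars.find (s.drop (j + 2)) [':', ' '] < 0
        · have hnf : ¬ [':', ' '] <:+: s.drop (j + 2) := by
            rw [← PySem.Chars.find_eq_neg_one_iff]
            have := PySem.Chars.neg_one_le_find (s.drop (j + 2)) [':', ' ']
            omega
          rw [dif_pos (by rw [hrest]; simp only [pvPartition]; rw [if_pos h2])]
          rw [hstep, pvSplitS_no _ hnf]
          simp only [pvPairsC, List.foldl_cons, List.foldl_nil]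
          rw [hname, hrest]
          congr 1
          simp only [pvPartition]; rw [if_pos h2]
        · have hstep2 := pvSplitS_step (s.drop (j + 2)) h2
          set j2 := (PySem.Chars.find (s.drop (j + 2)) [':', ' ']).toNat with hj2
          have hsep2 : (pvPartition (pvPartition s).2.2).2.1 = [':', ' '] := by
            rw [hrest]; simp only [pvPartition]; rw [if_neg h2]
          rw [dif_neg (by rw [hsep2]; simp)]
          have hval : (pvPartition (pvPartition s).2.2).1 = (s.drop (j + 2)).take j2 := by
            rw [hrest]; simp only [pvPartition]; rw [if_neg h2]
          have hrest2 : (pvPartition (pvPartition s).2.2).2.2 = (s.drop (j + 2)).drop (j2 + 2) := by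
            rw [hrest]; simp only [pvPartition]; rw [if_neg h2]
          have hlt : ((s.drop (j + 2)).drop (j2 + 2)).length ≤ m := by
            have hlt1 : ((pvPartition (pvPartition s).2.2)).2.2.length < (pvPartition s).2.2.length :=
              pvPartition_rest_lt _ (by rw [hsep2]; simp)
            have hlt2 : (pvPartition s).2.2.length < s.length :=
              pvPartition_rest_lt _ (by rw [hsep]; simp)
            rw [hrest2, hrest] at hlt1
            rw [hrest] at hlt2
            omega
          rw [hrest2, ih _ hlt]
          rw [hstep, hstep2]
          simp only [pvPairsC, List.foldl_cons]
          rw [hname, hval]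

-- pairing commutes with mapping String.ofList over the tokens
theorem pvPairs_map : ∀ (ts : List (List Char)),
    pvPairs (ts.map String.ofList) = (pvPairsC ts).map (fun p => (String.ofList p.1, String.ofList p.2))
  | [] => by simp [pvPairs, pvPairsC]
  | [x] => by simp [pvPairs, pvPairsC]
  | n :: v :: rest => by
      simp only [List.map_cons, pvPairs, pvPairsC, List.map]
      exact congrArg _ (pvPairs_map rest)

theorem pvFloordiv_two (n : Nat) : PySem.Int.floordiv (n : Int) 2 = ((n / 2 : Nat) : Int) := by
  rw [PySem.Int.floordiv, Int.fdiv_eq_ediv]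
  simp

-- shifting A's slice index by one pair is dropping two tokens
theorem pvStoreA_succ (n v : String) (rest : List String) (d : PySem.Dict String String) (k : Nat) :
    pvStoreA (n :: v :: rest) d ((k + 1 : Nat) : Int) = pvStoreA rest d (k : Int) := by
  have e1 : (2 * ((k + 1 : Nat) : Int)) = ((2 * k + 2 : Nat) : Int) := by push_cast; ring
  have e2 : (2 * ((k + 1 : Nat) : Int) + 2) = ((2 * k + 4 : Nat) : Int) := by push_cast; ring
  have e3 : (2 * ((k : Nat) : Int)) = ((2 * k : Nat) : Int) := by push_cast; ring
  have e4 : (2 * ((k : Nat) : Int) + 2) = ((2 * k + 2 : Nat) : Int) := by push_cast; ring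
  unfold pvStoreA
  rw [e2, e1, e4, e3, PySem.List.slice_natCast, PySem.List.slice_natCast]
  have hd : List.drop (2 * k + 2) (n :: v :: rest) = List.drop (2 * k) rest := by
    rw [show 2 * k + 2 = (2 * k + 1) + 1 from rfl, List.drop_succ_cons, List.drop_succ_cons]
  rw [hd]
  congr 2
  omega

-- A's index loop over range(len(tokens)//2) equals the pairwise fold
theorem pvKey_nat :
    ∀ (ts : List String) (d : PySem.Dict String String),
      List.foldl (fun (d : PySem.Dict String String) (k : Nat) => pvStoreA ts d (k : Int)) d (List.range (ts.length / 2))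
        = (pvPairs ts).foldl pvStoreS d
  | [], d => by simp [pvPairs]
  | [x], d => by simp [pvPairs]
  | n :: v :: rest, d => by
      have hlen : (n :: v :: rest).length / 2 = rest.length / 2 + 1 := by
        simp [List.length]; omega
      rw [hlen, List.range_succ_eq_map, List.foldl_cons, List.foldl_map]
      have hfun : (fun (d : PySem.Dict String String) (k : Nat) =>
          pvStoreA (n :: v :: rest) d ((Nat.succ k : Nat) : Int))
          = fun (d : PySem.Dict String String) (k : Nat) => pvStoreA rest d (k : Int) := by
        funext d k
        exact pvStoreA_succ n v rest d k
      have h0 : pvStoreA (n :: v :: rest) d ((0 : Nat) : Int) = pvStoreS d (n, v) := by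
        have e1 : (2 * ((0 : Nat) : Int)) = ((0 : Nat) : Int) := by norm_num
        have e2 : (2 * ((0 : Nat) : Int) + 2) = ((2 : Nat) : Int) := by norm_num
        unfold pvStoreA
        rw [e2, e1, PySem.List.slice_natCast]
        simp [pvStoreS]
      rw [hfun, h0, pvPairs, List.foldl_cons]
      exact pvKey_nat rest (pvStoreS d (n, v))

-- the split tokens of line[2:] are the ofList images of pvSplitS on the chars
theorem pvTokens_eq (line0 : String) :
    (PySem.Str.split? (PySem.Str.slice line0 (some 2) none) ": ").getD []
      = (pvSplitS (PySem.Chars.slice line0.toList (some 2) none)).map String.ofList := by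
  have h := PySem.Str.split?_map (PySem.Str.slice line0 (some 2) none) ": "
  have hsep : (": " : String).toList = [':', ' '] := by decide
  rw [hsep] at h
  have hchars : (PySem.Str.slice line0 (some 2) none).toList
      = PySem.Chars.slice line0.toList (some 2) none := by
    simp [PySem.Str.toList_slice]
  rw [hchars] at h
  rw [PySem.Chars.split?] at h
  simp only [List.isEmpty_cons, if_false, Bool.false_eq_true] at h
  rw [pvSplitOn_eq] at h
  cases hx : PySem.Str.split? (PySem.Str.slice line0 (some 2) none) ": " with
  | none => rw [hx] at h; simp at h
  | some ts =>
      rw [hx] at h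
      simp only [Option.map_some, Option.some.injEq] at h
      simp only [Option.getD_some]
      rw [← h]
      simp [List.map_map, Function.comp_def, String.ofList_toList]

-- the two per-line bodies agree
theorem pvLine_eq (d : PySem.Dict String String) (line0 : String) :
    pvLineA d line0 = pvParse d (PySem.Chars.slice line0.toList (some 2) none) := by
  simp only [pvLineA]
  rw [pvFloordiv_two, PySem.List.pyRange_zero_natCast, List.foldl_map, pvKey_nat, pvTokens_eq,
      pvPairs_map, pvParse_eq (PySem.Chars.slice line0.toList (some 2) none).length _ le_rfl d,
      List.foldl_map]
  rfl

-- ===== VERDICT (by name: the statement is the Claim_ definition above) =====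
theorem make_meta_dict_spec : Claim_equal_make_meta_dict := by
  intro meta_lines _
  show make_meta_dict meta_lines = make_meta_dict_alt meta_lines
  unfold make_meta_dict make_meta_dict_alt
  have : pvLineA = (fun d line => pvParse d (PySem.Chars.slice line.toList (some 2) none)) := by
    funext d line
    exact pvLine_eq d line
  rw [this]
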